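-- pv_equiv track=rewrite | github.com/abhilashasancheti/script-generation | code/evaluation.py | group_ilm_hypotheses
-- ===== SOURCE A (Python) =====
-- NUM_SEQUENCES = 5
--
-- def group_ilm_hypotheses(hypotheses):
--     hypotheses_basic = []
--     num_inputs = len(hypotheses)//NUM_SEQUENCES
--     for i in range(NUM_SEQUENCES):
--         hypos = []
--         for j in range(num_inputs):
--             hypos.append(hypotheses[i+(j*NUM_SEQUENCES)].strip().split('<SEP>')[1].lstrip())
--         hypotheses_basic.append(hypos)
--     return hypotheses_basic
-- ===== SOURCE B (Python) =====
-- NUM_SEQUENCES = 5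
--
-- def group_ilm_hypotheses(hypotheses):
--     n = len(hypotheses) // NUM_SEQUENCES
--     proc = [h.strip().split('<SEP>')[1].lstrip() for h in hypotheses[:n * NUM_SEQUENCES]]
--     cols = [[] for _ in range(NUM_SEQUENCES)]
--     for k in range(n):
--         row = proc[k * NUM_SEQUENCES:(k + 1) * NUM_SEQUENCES]
--         cols = [c + [x] for c, x in zip(cols, row)]
--     return cols
-- ===== Notes on version B (the rewrite author's own statement) =====
-- stated objective: alternative
-- what changed: B makes a single pass mapping the SEP-extraction over the truncated input, then transposes consecutive rows of 5 into columns with a zip fold, instead of A's nested index-arithmetic loops that rescan the input once per output group.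
import Mathlib
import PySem

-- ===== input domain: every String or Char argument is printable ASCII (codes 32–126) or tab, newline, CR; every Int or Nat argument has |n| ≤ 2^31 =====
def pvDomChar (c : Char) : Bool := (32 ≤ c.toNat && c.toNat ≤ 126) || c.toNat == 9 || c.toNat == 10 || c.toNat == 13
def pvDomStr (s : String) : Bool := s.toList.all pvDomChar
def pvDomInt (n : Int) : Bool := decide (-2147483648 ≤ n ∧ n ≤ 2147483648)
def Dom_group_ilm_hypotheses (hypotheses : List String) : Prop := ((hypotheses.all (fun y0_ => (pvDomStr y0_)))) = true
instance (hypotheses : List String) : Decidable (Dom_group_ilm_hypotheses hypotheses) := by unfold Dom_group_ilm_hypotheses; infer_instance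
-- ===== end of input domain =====

-- B regroups by mapping the SEP-extraction once over the truncated input and transposing
-- consecutive rows of 5 into columns (alternative decomposition; return value only, no mutation).

-- ===== PORT A =====
-- h.strip().split('<SEP>')[1].lstrip(); the IndexError when '<SEP>' is absent is excluded by Pre_
-- (the .getD fallbacks are totality guards never reached under Pre_; split? is `some`, sep nonempty)
def pvProc (h : String) : String :=
  PySem.Str.lstrip ((PySem.List.pyGet? ((PySem.Str.split? (PySem.Str.strip h) "<SEP>").getD []) 1).getD "")

def group_ilm_hypotheses (hypotheses : List String) : List (List String) :=
  -- num_inputs = len(hypotheses)//5 : length is a Nat, so Nat division is exact here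
  let numInputs := hypotheses.length / 5
  (List.range 5).foldl (fun hypotheses_basic i =>
    hypotheses_basic ++ [(List.range numInputs).foldl (fun hypos j =>
      -- hypotheses[i+(j*5)] : the index is provably in range, so getD is exact
      hypos ++ [pvProc (hypotheses.getD (i + j * 5) "")]) []]) []

-- ===== PORT B =====
def group_ilm_hypotheses_alt (hypotheses : List String) : List (List String) :=
  let n := hypotheses.length / 5
  let proc := (hypotheses.take (n * 5)).map pvProc      -- hypotheses[:n*5], nonneg bound → take
  (List.range n).foldl (fun cols k =>
      List.zipWith (fun c x => c ++ [x]) cols ((proc.drop (k * 5)).take 5))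
    [[], [], [], [], []]

-- ===== PRECONDITION & SPEC =====
-- Pre_ excludes inputs on which Python A raises IndexError: some accessed element (one of the
-- first (len//5)*5) contains no '<SEP>'.
def Pre_group_ilm_hypotheses (hypotheses : List String) : Prop :=
  ∀ h ∈ hypotheses.take ((hypotheses.length / 5) * 5), 1 ≤ PySem.Str.count h "<SEP>"
instance (hypotheses : List String) : Decidable (Pre_group_ilm_hypotheses hypotheses) := by
  unfold Pre_group_ilm_hypotheses; infer_instance

def pvWitness_group_ilm_hypotheses : List String :=
  ["a<SEP> x", "b<SEP>y", " c<SEP>z ", "d<SEP>w", "e<SEP>v"]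

def Spec_group_ilm_hypotheses (hypotheses : List String) (out : List (List String)) : Prop := out = group_ilm_hypotheses_alt hypotheses
instance (hypotheses : List String) (out : List (List String)) : Decidable (Spec_group_ilm_hypotheses hypotheses out) := by unfold Spec_group_ilm_hypotheses; infer_instance

-- ===== CLAIM (what is proved, stated in full; the proofs are below) =====
def Claim_equal_group_ilm_hypotheses : Prop := ∀ (hypotheses : List String), Dom_group_ilm_hypotheses hypotheses → Pre_group_ilm_hypotheses hypotheses → Spec_group_ilm_hypotheses hypotheses (group_ilm_hypotheses hypotheses)

-- ===== LEMMAS AND PROOFS =====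

-- the element read at absolute position idx
def pvF (hypotheses : List String) (idx : Nat) : String := pvProc (hypotheses.getD idx "")

lemma pv_foldl_push {α β : Type} (g : α → β) (l : List α) (acc : List β) :
    l.foldl (fun a x => a ++ [g x]) acc = acc ++ l.map g := by
  induction l generalizing acc with
  | nil => simp
  | cons x xs ih => simp [List.foldl_cons, ih]

lemma pv_row_eq (hypotheses : List String) (k : Nat)
    (hk : k < hypotheses.length / 5) :
    ((((hypotheses.take ((hypotheses.length / 5) * 5)).map pvProc).drop (k * 5)).take 5)
      = [pvF hypotheses (k * 5), pvF hypotheses (k * 5 + 1), pvF hypotheses (k * 5 + 2),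
         pvF hypotheses (k * 5 + 3), pvF hypotheses (k * 5 + 4)] := by
  have h5 : (hypotheses.length / 5) * 5 ≤ hypotheses.length := Nat.div_mul_le_self _ _
  apply List.ext_getElem
  · simp
    omega
  · intro i hi _
    have hi5 : i < 5 := by simp at hi; omega
    have hidx : k * 5 + i < hypotheses.length := by
      have : k * 5 + 5 ≤ (hypotheses.length / 5) * 5 := by
        have := Nat.succ_le_of_lt hk
        calc k * 5 + 5 = (k + 1) * 5 := by ring
          _ ≤ (hypotheses.length / 5) * 5 := Nat.mul_le_mul_right _ this
      omega
    have hidx' : k * 5 + i < (hypotheses.length / 5) * 5 := by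
      have : k * 5 + 5 ≤ (hypotheses.length / 5) * 5 := by
        have := Nat.succ_le_of_lt hk
        calc k * 5 + 5 = (k + 1) * 5 := by ring
          _ ≤ (hypotheses.length / 5) * 5 := Nat.mul_le_mul_right _ this
      omega
    have hl : ((((hypotheses.take ((hypotheses.length / 5) * 5)).map pvProc).drop (k * 5)).take 5)[i]
        = pvProc hypotheses[k * 5 + i] := by
      simp [List.getElem_take, List.getElem_drop, List.getElem_map]
    rw [hl]
    interval_cases i <;>
      simp only [List.getElem_cons_zero, List.getElem_cons_succ, pvF] <;>
      (rw [List.getD_eq_getElem _ _ (by omega)]; try norm_num)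

-- B's fold over the first m rows yields the five columns restricted to those rows
lemma pv_foldB (hypotheses : List String) (m : Nat) (hm : m ≤ hypotheses.length / 5) :
    (List.range m).foldl (fun cols k =>
        List.zipWith (fun c x => c ++ [x]) cols
          ((((hypotheses.take ((hypotheses.length / 5) * 5)).map pvProc).drop (k * 5)).take 5))
      [[], [], [], [], []]
    = [(List.range m).map (fun j => pvF hypotheses (j * 5)),
       (List.range m).map (fun j => pvF hypotheses (j * 5 + 1)),
       (List.range m).map (fun j => pvF hypotheses (j * 5 + 2)),
       (List.range m).map (fun j => pvF hypotheses (j * 5 + 3)),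
       (List.range m).map (fun j => pvF hypotheses (j * 5 + 4))] := by
  induction m with
  | zero => simp
  | succ m ih =>
    have hm' : m ≤ hypotheses.length / 5 := Nat.le_of_succ_le hm
    rw [List.range_succ, List.foldl_append, ih hm']
    simp only [List.foldl_cons, List.foldl_nil]
    rw [pv_row_eq hypotheses m (by omega)]
    simp

theorem group_ilm_hypotheses_eq (hypotheses : List String) :
    group_ilm_hypotheses hypotheses = group_ilm_hypotheses_alt hypotheses := by
  unfold group_ilm_hypotheses group_ilm_hypotheses_alt
  rw [pv_foldB hypotheses (hypotheses.length / 5) le_rfl]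
  rw [pv_foldl_push]
  have hinner : ∀ i : Nat, (List.range (hypotheses.length / 5)).foldl
      (fun hypos j => hypos ++ [pvProc (hypotheses.getD (i + j * 5) "")]) []
      = (List.range (hypotheses.length / 5)).map (fun j => pvF hypotheses (j * 5 + i)) := by
    intro i
    rw [pv_foldl_push]
    simp only [List.nil_append]
    apply List.map_congr_left
    intro j _
    simp [pvF, Nat.add_comm]
  show [] ++ (List.range 5).map _ = _
  have h5 : List.range 5 = [0, 1, 2, 3, 4] := by decide
  rw [List.nil_append, h5]
  simp only [List.map_cons, List.map_nil]
  rw [hinner 0, hinner 1, hinner 2, hinner 3, hinner 4]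
  norm_num

-- ===== VERDICT (by name: the statement is the Claim_ definition above) =====
theorem group_ilm_hypotheses_spec : Claim_equal_group_ilm_hypotheses := by
  intro hypotheses _ _
  unfold Spec_group_ilm_hypotheses
  exact group_ilm_hypotheses_eq hypotheses
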